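-- pv_equiv track=rewrite | github.com/wyk18703232953/myResearch | codeComplex/data/filteredData/python/np/python_np_0416.py | solve
-- ===== SOURCE A (Python) =====
-- def solve(a):
--     n = len(a)
--     if n == 0:
--         return 0, 0
--     m = len(a[0]) if a[0] else 0
--
--     def check(mid):
--         mask = (1 << m) - 1
--         s = set()
--         d = dict()
--         for i in range(n):
--             state = 0
--             for j in range(m):
--                 if a[i][j] >= mid:
--                     state += 1 << j
--             if state in s:
--                 continue
--             s.add(state)
--             k = state
--             while k >= 0:
--                 k &= state
--                 d[k] = i
--                 k -= 1
--             need = mask ^ state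
--             if need in d:
--                 q1, q2 = d[need], i
--                 if q1 > q2:
--                     q1, q2 = q2, q1
--                 return True, (q1, q2)
--         return False, (-1, -1)
--
--     left = 0
--     right = 10**9 + 1
--     res_i, res_j = 0, 0
--     while right - left > 1:
--         mid = (right + left) // 2
--         flag, (q1, q2) = check(mid)
--         if flag:
--             left = mid
--             res_i, res_j = q1, q2
--         else:
--             right = mid
--     return res_i + 1, res_j + 1
-- ===== SOURCE B (Python) =====
-- def solve(a):
--     if not a:
--         return 0, 0
--     m = len(a[0]) if a[0] else 0
--     full = (1 << m) - 1
--
--     def row_state(row, mid):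
--         state = 0
--         for x in reversed(row[:m]):
--             state = 2 * state + (1 if x >= mid else 0)
--         return state
--
--     def check(mid):
--         states = [row_state(r, mid) for r in a]
--         first = {}  # distinct state -> index of its first occurrence, in appearance order
--         for i, st in enumerate(states):
--             if st in first:
--                 continue
--             first[st] = i
--             need = full ^ st
--             best = -1
--             for prev, idx in first.items():
--                 if prev & need == need and idx > best:
--                     best = idx
--             if best >= 0:
--                 return (min(best, i), max(best, i))
--         return None
--
--     lo, hi = 0, 10 ** 9 + 1
--     res = (0, 0)
--     while hi - lo > 1:
--         mid = (lo + hi) // 2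
--         pair = check(mid)
--         if pair is None:
--             hi = mid
--         else:
--             lo = mid
--             res = pair
--     return res[0] + 1, res[1] + 1
-- ===== Notes on version B (the rewrite author's own statement) =====
-- stated objective: alternative
-- what changed: B drops A's per-row submask enumeration dict (the `while k >= 0: k &= state` fill) entirely: it precomputes each row's state by Horner evaluation over the reversed row prefix, keeps a dict state->first index in appearance order, and finds the partner by a max-index scan over that dict's items; check returns an Option pair instead of a (flag, pair) tuple.
-- outside the precondition, e.g. on solve([[1000000000, 1000000000], [1]]): A returns (1, 1), B returns (1, 1)
import Mathlib
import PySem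

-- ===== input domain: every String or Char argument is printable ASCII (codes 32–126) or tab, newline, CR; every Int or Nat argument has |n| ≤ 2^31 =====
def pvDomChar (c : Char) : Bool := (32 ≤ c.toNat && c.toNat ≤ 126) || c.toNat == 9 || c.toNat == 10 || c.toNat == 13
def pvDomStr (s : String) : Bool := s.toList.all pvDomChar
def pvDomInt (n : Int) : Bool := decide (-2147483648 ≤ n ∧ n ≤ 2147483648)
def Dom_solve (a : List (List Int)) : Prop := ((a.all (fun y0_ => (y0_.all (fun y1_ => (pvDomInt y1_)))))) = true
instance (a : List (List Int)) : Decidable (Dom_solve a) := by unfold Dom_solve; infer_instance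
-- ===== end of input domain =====

-- B drops A's per-row submask-enumeration dict: it precomputes each row's state by Horner
-- evaluation of the reversed row prefix, keeps a dict state -> first index and scans its items
-- for the partner with maximal index; return values are identical (no observable mutation).

-- needed by subLoopA's termination proof (cited in its decreasing_by)
theorem pv_band_le_left (k s : Int) (h : 0 ≤ k) : PySem.Int.band k s ≤ k := by
  unfold PySem.Int.band
  split_ifs <;> try omega
  have := Nat.and_le_left (n := k.toNat) (m := s.toNat); omega

-- ===== PORT A =====
-- state = 0; for j in range(m): if a[i][j] >= mid: state += 1 << j
-- (j from range(m) is ≥ 0, so Python's `1 << j` is exactly `(1 : Int) <<< j.toNat`;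
--  a[i][j] is pyGetD with an arbitrary default, exact under Pre_solve)
def stateA (row : List Int) (m : Nat) (mid : Int) : Int :=
  (PySem.List.pyRange 0 (m : Int) 1).foldl
    (fun state j => if PySem.List.pyGetD row j 0 ≥ mid then state + (1 <<< j.toNat) else state) 0

-- k = state; while k >= 0: k &= state; d[k] = i; k -= 1
def subLoopA (state i : Int) (d : PySem.Dict Int Int) (k : Int) : PySem.Dict Int Int :=
  if hk : 0 ≤ k then
    subLoopA state i (d.insert (PySem.Int.band k state) i) (PySem.Int.band k state - 1)
  else d
termination_by (k + 1).toNat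
decreasing_by
  have := pv_band_le_left k state hk
  have : (0 : Int) ≤ PySem.Int.band k state ∨ PySem.Int.band k state < 0 := by omega
  omega

-- the `for i in range(n)` body of A's check, with early return
def checkALoop (m : Nat) (mask mid : Int) :
    List (List Int) → Int → PySem.Set Int → PySem.Dict Int Int → Bool × (Int × Int)
  | [], _, _, _ => (false, (-1, -1))
  | row :: rest, i, s, d =>
    let state := stateA row m mid
    if PySem.Set.contains s state then checkALoop m mask mid rest (i + 1) s d
    else
      let s' := PySem.Set.add s state
      let d' := subLoopA state i d state
      let need := PySem.Int.bxor mask state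
      match d'.get? need with
      | some q1 => (true, if q1 > i then (i, q1) else (q1, i))
      | none => checkALoop m mask mid rest (i + 1) s' d'

def checkA (a : List (List Int)) (m : Nat) (mid : Int) : Bool × (Int × Int) :=
  checkALoop m ((1 : Int) <<< m - 1) mid a 0 PySem.Set.empty PySem.Dict.empty

-- while right - left > 1: mid = (right + left) // 2; …
def bsA (a : List (List Int)) (m : Nat) (left right : Int) (res : Int × Int) : Int × Int :=
  if h : right - left > 1 then
    let mid := PySem.Int.floordiv (right + left) 2
    let r := checkA a m mid
    if r.1 then bsA a m mid right r.2 else bsA a m left mid res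
  else res
termination_by (right - left).toNat
decreasing_by
  all_goals
    rw [PySem.Int.floordiv_eq_ediv_of_pos (by norm_num)]
    omega

def solve (a : List (List Int)) : Int × Int :=
  if (a.length : Int) == 0 then (0, 0)
  else
    let m := (a.headD []).length   -- m = len(a[0]) if a[0] else 0
    let r := bsA a m 0 (10 ^ 9 + 1) (0, 0)
    (r.1 + 1, r.2 + 1)

-- ===== PORT B =====
-- state = 0
-- for x in reversed(row[:m]): state = 2 * state + (1 if x >= mid else 0)
def rowStateB (row : List Int) (m : Nat) (mid : Int) : Int :=
  ((PySem.List.slice row none (some ((m : Nat) : Int))).reverse).foldl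
    (fun state x => 2 * state + (if x ≥ mid then 1 else 0)) 0

-- best = -1
-- for prev, idx in first.items(): if prev & need == need and idx > best: best = idx
def bestScan (items : List (Int × Int)) (need : Int) : Int :=
  items.foldl (fun best p => if PySem.Int.band p.1 need == need && p.2 > best then p.2 else best) (-1)

-- for i, st in enumerate(states): … (early `return (min, max)` = some, fall-through = None)
def checkBLoop (full : Int) : List Int → Int → PySem.Dict Int Int → Option (Int × Int)
  | [], _, _ => none
  | st :: rest, i, first =>
    if first.contains st then checkBLoop full rest (i + 1) first
    else
      let first' := first.insert st i
      let best := bestScan first'.items (PySem.Int.bxor full st)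
      if best ≥ 0 then some (min best i, max best i)
      else checkBLoop full rest (i + 1) first'

-- states = [row_state(r, mid) for r in a]
def checkB (a : List (List Int)) (full : Int) (m : Nat) (mid : Int) : Option (Int × Int) :=
  checkBLoop full (a.map (fun r => rowStateB r m mid)) 0 PySem.Dict.empty

def bsB (a : List (List Int)) (full : Int) (m : Nat) (lo hi : Int) (res : Int × Int) : Int × Int :=
  if h : hi - lo > 1 then
    let mid := PySem.Int.floordiv (lo + hi) 2
    match checkB a full m mid with
    | none => bsB a full m lo mid res
    | some p => bsB a full m mid hi p
  else res
termination_by (hi - lo).toNat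
decreasing_by
  all_goals
    rw [PySem.Int.floordiv_eq_ediv_of_pos (by norm_num)]
    omega

def solve_alt (a : List (List Int)) : Int × Int :=
  if a.isEmpty then (0, 0)
  else
    let m := (a.headD []).length
    let full := (1 : Int) <<< m - 1
    let r := bsB a full m 0 (10 ^ 9 + 1) (0, 0)
    (r.1 + 1, r.2 + 1)

-- ===== PRECONDITION & SPEC =====
-- Pre_ excludes ragged inputs having a row shorter than the first row: on those A in general
-- raises IndexError (only an early covering pair found before the short row avoids it, in which
-- case A and B agree anyway — the exact raising condition is algorithm-dependent, so the whole
-- ragged class is excluded).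
def Pre_solve (a : List (List Int)) : Prop :=
  ∀ row ∈ a, (a.headD []).length ≤ row.length
instance (a : List (List Int)) : Decidable (Pre_solve a) := by unfold Pre_solve; infer_instance
def pvWitness_solve : List (List Int) := [[1, 5], [3, 2]]

def Spec_solve (a : List (List Int)) (out : Int × Int) : Prop := out = solve_alt a
instance (a : List (List Int)) (out : Int × Int) : Decidable (Spec_solve a out) := by unfold Spec_solve; infer_instance

-- ===== CLAIM (what is proved, stated in full; the proofs are below) =====
def Claim_equal_solve : Prop := ∀ (a : List (List Int)), Dom_solve a → Pre_solve a → Spec_solve a (solve a)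

-- ===== LEMMAS AND PROOFS =====

-- ---- generic Nat bit facts ----

theorem pv_land_decomp (x y : Nat) : x &&& y = 2 * (x / 2 &&& y / 2) + x % 2 * (y % 2) := by
  have hd : x % 2 * (y % 2) ≤ 1 := by
    rcases Nat.mod_two_eq_zero_or_one x with hx | hx <;>
      rcases Nat.mod_two_eq_zero_or_one y with hy | hy <;> simp [hx, hy]
  apply Nat.eq_of_testBit_eq
  intro i
  cases i with
  | zero =>
    simp only [Nat.testBit_zero]
    rcases Nat.mod_two_eq_zero_or_one x with hx | hx <;>
      rcases Nat.mod_two_eq_zero_or_one y with hy | hy <;>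
        simp [hx, hy]
  | succ n =>
    have h2 : (2 * (x / 2 &&& y / 2) + x % 2 * (y % 2)) / 2 = x / 2 &&& y / 2 := by omega
    simp only [Nat.testBit_and]
    simp only [Nat.testBit_add_one]
    rw [h2, Nat.testBit_and]

-- the largest submask of s strictly below a submask k is (k-1) &&& s
theorem pv_submask_pred (k : Nat) : ∀ j s : Nat, j &&& s = j → k &&& s = k → 0 < k →
    (j < k ↔ j ≤ (k - 1) &&& s) := by
  induction k using Nat.strong_induction_on with
  | _ k IH =>
    intro j s hj hk hk0
    have hdj := pv_land_decomp j s
    have hdk := pv_land_decomp k s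
    have hdk1 := pv_land_decomp (k - 1) s
    have hj2 : j / 2 &&& s / 2 = j / 2 ∧ j % 2 * (s % 2) = j % 2 := by
      have h1 : j / 2 &&& s / 2 ≤ j / 2 := Nat.and_le_left
      have h2 : j % 2 * (s % 2) ≤ 1 := by
        rcases Nat.mod_two_eq_zero_or_one j with h | h <;> simp [h] <;> omega
      omega
    have hk2 : k / 2 &&& s / 2 = k / 2 ∧ k % 2 * (s % 2) = k % 2 := by
      have h1 : k / 2 &&& s / 2 ≤ k / 2 := Nat.and_le_left
      have h2 : k % 2 * (s % 2) ≤ 1 := by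
        rcases Nat.mod_two_eq_zero_or_one k with h | h <;> simp [h] <;> omega
      omega
    rcases Nat.mod_two_eq_zero_or_one k with hkb | hkb
    · -- k even: k - 1 = 2*(k/2 - 1) + 1
      have hk20 : 0 < k / 2 := by omega
      have hkm1 : (k - 1) / 2 = k / 2 - 1 ∧ (k - 1) % 2 = 1 := by omega
      have IH2 := IH (k / 2) (by omega) (j / 2) (s / 2) hj2.1 hk2.1 hk20
      have e1 : (k - 1) &&& s = 2 * ((k / 2 - 1) &&& s / 2) + 1 * (s % 2) := by
        rw [hdk1, hkm1.1, hkm1.2]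
      have hjb : j % 2 = 0 ∨ j % 2 = 1 := Nat.mod_two_eq_zero_or_one j
      have hjs : j % 2 ≤ s % 2 := by
        rcases hjb with h | h
        · omega
        · have h2 := hj2.2; rw [h] at h2; omega
      constructor
      · intro hlt
        have h3 := IH2.mp (by omega)
        omega
      · intro hle
        have h5 := IH2.mpr (by omega)
        omega
    · -- k odd: k - 1 = 2*(k/2)
      have hkm1 : (k - 1) / 2 = k / 2 ∧ (k - 1) % 2 = 0 := by omega
      have e1 : (k - 1) &&& s = 2 * (k / 2 &&& s / 2) + 0 * (s % 2) := by
        rw [hdk1, hkm1.1, hkm1.2]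
      omega

theorem pv_one_shiftLeft (j : Nat) : ((1 : Int) <<< j) = ((2 ^ j : Nat) : Int) := by
  simp [Int.shiftLeft_eq]

theorem pv_mask_cast (m : Nat) : ((1 : Int) <<< m - 1) = ((2 ^ m - 1 : Nat) : Int) := by
  rw [pv_one_shiftLeft]
  have : 1 ≤ 2 ^ m := Nat.one_le_two_pow
  omega

-- ---- the row state, three presentations: A's shifted-add fold, a little-endian
--      structural recursion (natStateL), and B's Horner fold ----

def natState (row : List Int) (m : Nat) (mid : Int) : Nat :=
  (List.range m).foldl
    (fun (st j : Nat) => if PySem.List.pyGetD row ((j : Nat) : Int) 0 ≥ mid then st + 2 ^ j else st) 0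

def natStateL (mid : Int) : List Int → Nat
  | [] => 0
  | x :: xs => (if x ≥ mid then 1 else 0) + 2 * natStateL mid xs

theorem stateA_eq (row : List Int) (m : Nat) (mid : Int) :
    stateA row m mid = ((natState row m mid : Nat) : Int) := by
  unfold stateA natState
  rw [PySem.List.pyRange_zero_natCast, List.foldl_map]
  have aux : ∀ (l : List Nat) (st : Nat),
      l.foldl (fun (state : Int) (j : Nat) =>
          if PySem.List.pyGetD row ((j : Nat) : Int) 0 ≥ mid then state + ((1 <<< ((j : Nat) : Int).toNat : Nat) : Int)
          else state) ((st : Nat) : Int) =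
      (((l.foldl (fun (st j : Nat) => if PySem.List.pyGetD row ((j : Nat) : Int) 0 ≥ mid then st + 2 ^ j else st) st : Nat)) : Int) := by
    intro l
    induction l with
    | nil => intro st; rfl
    | cons x xs ih =>
      intro st
      simp only [List.foldl_cons]
      by_cases h : PySem.List.pyGetD row ((x : Nat) : Int) 0 ≥ mid
      · rw [if_pos h, if_pos h]
        have he : ((st : Nat) : Int) + ((1 <<< ((x : Nat) : Int).toNat : Nat) : Int) = (((st + 2 ^ x : Nat)) : Int) := by
          rw [Int.toNat_natCast, Nat.shiftLeft_eq]
          push_cast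
          ring
        rw [he, ih]
      · rw [if_neg h, if_neg h, ih]
  exact aux (List.range m) 0

-- accumulator extraction for a conditional-sum fold
theorem pv_foldl_condsum_acc (w : Nat → Nat) (c : Nat → Prop) [DecidablePred c] :
    ∀ (l : List Nat) (b : Nat),
      l.foldl (fun st j => if c j then st + w j else st) b =
        b + l.foldl (fun st j => if c j then st + w j else st) 0 := by
  intro l
  induction l with
  | nil => intro b; simp
  | cons x xs ih =>
    intro b
    simp only [List.foldl_cons]
    by_cases h : c x
    · rw [if_pos h, if_pos h, ih (b + w x), ih (0 + w x)]; omega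
    · rw [if_neg h, if_neg h]; exact ih b

-- doubling the weights doubles the conditional sum
theorem pv_foldl_condsum_shift (c : Nat → Prop) [DecidablePred c] :
    ∀ (l : List Nat) (b : Nat),
      l.foldl (fun st j => if c j then st + 2 ^ (j + 1) else st) b =
        b + 2 * l.foldl (fun st j => if c j then st + 2 ^ j else st) 0 := by
  intro l
  induction l with
  | nil => intro b; simp
  | cons x xs ih =>
    intro b
    simp only [List.foldl_cons]
    rw [pv_foldl_condsum_acc (fun j => 2 ^ j) c xs]
    by_cases h : c x
    · rw [if_pos h, if_pos h, ih (b + 2 ^ (x + 1))]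
      have : (2 : Nat) ^ (x + 1) = 2 * 2 ^ x := by ring
      omega
    · rw [if_neg h, if_neg h, ih b]; omega

theorem natState_zero (row : List Int) (mid : Int) : natState row 0 mid = 0 := rfl

theorem natState_succ_cons (x : Int) (xs : List Int) (m : Nat) (mid : Int) :
    natState (x :: xs) (m + 1) mid = (if x ≥ mid then 1 else 0) + 2 * natState xs m mid := by
  unfold natState
  rw [List.range_succ_eq_map, List.foldl_cons, List.foldl_map]
  have hstep : ∀ (st j : Nat),
      (if PySem.List.pyGetD (x :: xs) ((j.succ : Nat) : Int) 0 ≥ mid then st + 2 ^ j.succ else st) =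
      (if PySem.List.pyGetD xs ((j : Nat) : Int) 0 ≥ mid then st + 2 ^ (j + 1) else st) := by
    intro st j
    have hc : ((j.succ : Nat) : Int) = (((j + 1 : Nat)) : Int) := by norm_num
    have : PySem.List.pyGetD (x :: xs) ((j.succ : Nat) : Int) 0 = PySem.List.pyGetD xs ((j : Nat) : Int) 0 := by
      rw [hc, PySem.List.pyGetD_natCast, PySem.List.pyGetD_natCast, List.getD_eq_getElem?_getD,
          List.getD_eq_getElem?_getD]
      simp
    rw [this]
  simp only [hstep]
  rw [pv_foldl_condsum_shift (fun j => PySem.List.pyGetD xs ((j : Nat) : Int) 0 ≥ mid) (List.range m)]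
  have h0 : PySem.List.pyGetD (x :: xs) ((0 : Nat) : Int) 0 = x := by
    rw [PySem.List.pyGetD_natCast]
    simp
  rw [h0]
  by_cases h : x ≥ mid
  · rw [if_pos h, if_pos h]
    omega
  · rw [if_neg h, if_neg h]

theorem natState_take (mid : Int) : ∀ (m : Nat) (row : List Int), m ≤ row.length →
    natState row m mid = natStateL mid (row.take m) := by
  intro m
  induction m with
  | zero => intro row _; rw [natState_zero]; rfl
  | succ k ih =>
    intro row hlen
    match row with
    | [] => simp at hlen
    | x :: xs =>
      rw [natState_succ_cons, List.take_succ_cons]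
      show _ = (if x ≥ mid then 1 else 0) + 2 * natStateL mid (xs.take k)
      rw [ih xs (by simpa using hlen)]

-- B's Horner fold computes natStateL of the prefix
theorem pv_horner_eq (mid : Int) : ∀ (l : List Int),
    (l.reverse).foldl (fun state x => 2 * state + (if x ≥ mid then 1 else 0)) (0 : Int) =
      ((natStateL mid l : Nat) : Int) := by
  have key : ∀ (l : List Int),
      l.foldr (fun x (y : Int) => 2 * y + (if x ≥ mid then 1 else 0)) 0 =
        ((natStateL mid l : Nat) : Int) := by
    intro l
    induction l with
    | nil => rfl
    | cons x xs ih =>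
      simp only [List.foldr_cons, ih, natStateL]
      by_cases h : x ≥ mid
      · rw [if_pos h, if_pos h]; push_cast; ring
      · rw [if_neg h, if_neg h]; push_cast; ring
  intro l
  rw [List.foldl_reverse]
  exact key l

theorem rowStateB_eq (row : List Int) (m : Nat) (mid : Int) (hlen : m ≤ row.length) :
    rowStateB row m mid = ((natState row m mid : Nat) : Int) := by
  unfold rowStateB
  rw [PySem.List.slice_to_natCast, pv_horner_eq, natState_take mid m row hlen]

-- ---- the dict fill loop writes exactly the submasks of state ----

theorem subLoopA_get (sn : Nat) (i : Int) (k : Int) (d : PySem.Dict Int Int) (q : Nat) :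
    (subLoopA (↑sn) i d k).get? (↑q) =
      if q &&& sn = q ∧ 0 ≤ k ∧ q ≤ k.toNat &&& sn then some i else d.get? (↑q) := by
  fun_induction subLoopA (↑sn : Int) i d k with
  | case1 d k hk ih =>
    have hb : PySem.Int.band k (↑sn : Int) = ((k.toNat &&& sn : Nat) : Int) := by
      rw [PySem.Int.band_of_nonneg hk (by positivity), Int.toNat_natCast]
    rw [hb] at ih ⊢
    rw [ih, PySem.Dict.get?_insert]
    have ht : (((k.toNat &&& sn : Nat) : Int) - 1).toNat = (k.toNat &&& sn) - 1 := by omega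
    rw [ht]
    have hknsub : (k.toNat &&& sn) &&& sn = k.toNat &&& sn := by rw [Nat.and_assoc, Nat.and_self]
    by_cases hq : q &&& sn = q
    · by_cases hkn0 : k.toNat &&& sn = 0
      · rw [if_neg (by rintro ⟨_, h2, _⟩; omega)]
        by_cases hqe : q = k.toNat &&& sn
        · rw [if_pos (by exact_mod_cast congrArg (Nat.cast : Nat → Int) hqe),
              if_pos ⟨hq, hk, le_of_eq hqe⟩]
        · rw [if_neg (by intro h; exact hqe (by exact_mod_cast h)),
              if_neg (by rintro ⟨_, _, h3⟩; omega)]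
      · have hkpos : 0 < k.toNat &&& sn := Nat.pos_of_ne_zero hkn0
        have hiff := pv_submask_pred (k.toNat &&& sn) q sn hq hknsub hkpos
        by_cases hqlt : q < k.toNat &&& sn
        · rw [if_pos ⟨hq, by omega, hiff.mp hqlt⟩, if_pos ⟨hq, hk, le_of_lt hqlt⟩]
        · have hC1 : ¬(q &&& sn = q ∧ 0 ≤ ((k.toNat &&& sn : Nat) : Int) - 1 ∧ q ≤ ((k.toNat &&& sn) - 1) &&& sn) := by
            rintro ⟨_, _, h3⟩
            exact hqlt (hiff.mpr h3)
          rw [if_neg hC1]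
          by_cases hqe : q = k.toNat &&& sn
          · rw [if_pos (by exact_mod_cast congrArg (Nat.cast : Nat → Int) hqe),
                if_pos ⟨hq, hk, le_of_eq hqe⟩]
          · rw [if_neg (by intro h; exact hqe (by exact_mod_cast h)),
                if_neg (by rintro ⟨_, _, h3⟩; omega)]
    · have hne : ¬((q : Int) = ((k.toNat &&& sn : Nat) : Int)) := by
        intro h
        have h' : q = k.toNat &&& sn := by exact_mod_cast h
        exact hq (by rw [h']; exact hknsub)
      rw [if_neg (fun h => hq h.1), if_neg hne, if_neg (fun h => hq h.1)]
  | case2 d k hk =>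
    rw [if_neg (by rintro ⟨_, h2, _⟩; exact hk h2)]

theorem subLoopA_run (sn : Nat) (i : Int) (d : PySem.Dict Int Int) (q : Nat) :
    (subLoopA (↑sn) i d (↑sn)).get? (↑q) =
      if q &&& sn = q then some i else d.get? (↑q) := by
  rw [subLoopA_get]
  by_cases hq : q &&& sn = q
  · rw [if_pos hq, if_pos]
    refine ⟨hq, by positivity, ?_⟩
    rw [Int.toNat_natCast, Nat.and_self]
    calc q = q &&& sn := hq.symm
      _ ≤ sn := Nat.and_le_right
  · rw [if_neg hq, if_neg (by tauto)]

-- ---- bestScan is the last matching recorded index ----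

theorem bestScan_mem (need : Int) : ∀ (order : List (Int × Int)) (b : Int),
    order.foldl (fun best p => if PySem.Int.band p.1 need == need && p.2 > best then p.2 else best) b = b ∨
    order.foldl (fun best p => if PySem.Int.band p.1 need == need && p.2 > best then p.2 else best) b ∈ order.map (·.2) := by
  intro order
  induction order with
  | nil => intro b; left; rfl
  | cons p rest ih =>
    intro b
    simp only [List.foldl_cons, List.map_cons]
    by_cases h : (PySem.Int.band p.1 need == need && p.2 > b) = true
    · rw [if_pos h]
      rcases ih p.2 with h1 | h1
      · right; rw [h1]; exact List.mem_cons_self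
      · right; exact List.mem_cons_of_mem _ h1
    · rw [if_neg h]
      rcases ih b with h1 | h1
      · left; exact h1
      · right; exact List.mem_cons_of_mem _ h1

theorem bestScan_eq (need : Int) : ∀ (order : List (Int × Int)),
    (∀ p ∈ order, 0 ≤ p.2) → order.Pairwise (fun p q => p.2 < q.2) →
    bestScan order need =
      (((order.filter (fun p => PySem.Int.band p.1 need == need)).map (·.2)).getLast?).getD (-1) := by
  intro order
  induction order using List.reverseRecOn with
  | nil => intro _ _; rfl
  | append_singleton rest p ih =>
    intro hpos hpair
    have hpos' : ∀ q ∈ rest, 0 ≤ q.2 := fun q hq => hpos q (List.mem_append_left _ hq)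
    have hpair' : rest.Pairwise (fun p q => p.2 < q.2) :=
      (List.pairwise_append.mp hpair).1
    have hlt : ∀ q ∈ rest, q.2 < p.2 := by
      intro q hq
      exact (List.pairwise_append.mp hpair).2.2 q hq p (List.mem_cons_self)
    unfold bestScan at ih ⊢
    rw [List.foldl_append, List.filter_append, List.map_append]
    simp only [List.foldl_cons, List.foldl_nil]
    by_cases hc : (PySem.Int.band p.1 need == need) = true
    · have hgt : rest.foldl (fun best p => if PySem.Int.band p.1 need == need && p.2 > best then p.2 else best) (-1) < p.2 := by
        rcases bestScan_mem need rest (-1) with h | h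
        · rw [h]; have := hpos p (List.mem_append_right _ List.mem_cons_self); omega
        · rcases List.mem_map.mp h with ⟨q, hq, hq2⟩
          rw [← hq2]; exact hlt q hq
      rw [if_pos (by rw [Bool.and_eq_true, decide_eq_true_eq]; exact ⟨hc, hgt⟩)]
      simp only [List.filter_cons, List.filter_nil]
      rw [if_pos hc]
      simp
    · rw [if_neg (by intro hcontra; rw [Bool.and_eq_true] at hcontra; exact hc hcontra.1)]
      simp only [List.filter_cons, List.filter_nil]
      rw [if_neg hc]
      simp only [List.map_nil, List.append_nil]
      exact ih hpos' hpair'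

-- min/max of two ints as A writes it
theorem pv_pair_minmax (v i : Int) :
    (if v > i then ((i, v) : Int × Int) else (v, i)) = (min v i, max v i) := by
  by_cases h : v > i
  · rw [if_pos h]
    rw [min_comm]
    rw [min_eq_left (by omega), max_eq_left (by omega)]
  · rw [if_neg h]
    rw [min_eq_left (by omega), max_eq_right (by omega)]

-- proof-only bridge between A's (flag, pair) and B's Option result
def pvOptA (o : Option (Int × Int)) : Bool × (Int × Int) :=
  match o with
  | none => (false, (-1, -1))
  | some p => (true, p)

-- ---- the main loop equivalence: A's set is B's dict's key list, A's submask dict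
--      looks up what B's items scan finds ----

theorem checkLoop_eq (m : Nat) (mid : Int) :
    ∀ (rows : List (List Int)) (i : Int) (first : PySem.Dict Int Int) (d : PySem.Dict Int Int),
      (∀ row ∈ rows, m ≤ row.length) →
      0 ≤ i →
      first.keys.Nodup →
      (∀ qn : Nat, d.get? (↑qn) =
        ((first.items.filter (fun p => PySem.Int.band p.1 (↑qn) == ((qn : Nat) : Int))).map (·.2)).getLast?) →
      (∀ p ∈ first.items, 0 ≤ p.2 ∧ p.2 < i) →
      first.items.Pairwise (fun p q => p.2 < q.2) →
      checkALoop m ((1 : Int) <<< m - 1) mid rows i first.keys d =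
        pvOptA (checkBLoop ((1 : Int) <<< m - 1) (rows.map (fun r => rowStateB r m mid)) i first) := by
  intro rows
  induction rows with
  | nil => intro i first d _ _ _ _ _ _; rfl
  | cons row rest ih =>
    intro i first d hlen hi hnd hinv hpos hpair
    have hrow : m ≤ row.length := hlen row List.mem_cons_self
    simp only [checkALoop, List.map_cons, checkBLoop, stateA_eq, rowStateB_eq row m mid hrow]
    set sn := natState row m mid with hsn
    -- the membership tests agree
    have hmemeq : PySem.Set.contains first.keys ((sn : Nat) : Int) = first.contains ((sn : Nat) : Int) := by
      by_cases h : ((sn : Nat) : Int) ∈ first.keys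
      · rw [(PySem.Set.contains_iff _ _).mpr h,
            (PySem.Dict.contains_iff_mem_keys _ _).mpr h]
      · rw [Bool.eq_iff_iff]
        constructor
        · intro hc; exact absurd ((PySem.Set.contains_iff _ _).mp hc) h
        · intro hc; exact absurd ((PySem.Dict.contains_iff_mem_keys _ _).mp hc) h
    by_cases hmem : first.contains ((sn : Nat) : Int) = true
    · rw [hmemeq, if_pos hmem, if_pos hmem]
      exact ih (i + 1) first d (fun r hr => hlen r (List.mem_cons_of_mem _ hr)) (by omega) hnd hinv
        (fun p hp => ⟨(hpos p hp).1, by have := (hpos p hp).2; omega⟩) hpair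
    · rw [hmemeq, if_neg hmem, if_neg hmem]
      have hmemF : first.contains ((sn : Nat) : Int) = false := by
        rw [Bool.not_eq_true] at hmem; exact hmem
      -- A's set add and B's dict insert extend the same key list
      have hkeys' : (first.insert ((sn : Nat) : Int) i).keys = first.keys ++ [((sn : Nat) : Int)] :=
        PySem.Dict.keys_insert_of_not_contains first i hmemF
      have hsetadd : PySem.Set.add first.keys ((sn : Nat) : Int) = first.keys ++ [((sn : Nat) : Int)] := by
        unfold PySem.Set.add
        rw [hmemeq, hmemF]
        simp
      have hitems' : (first.insert ((sn : Nat) : Int) i).items = first.items ++ [(((sn : Nat) : Int), i)] :=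
        PySem.Dict.items_insert_of_not_contains first i hmemF
      have hnd' : (first.insert ((sn : Nat) : Int) i).keys.Nodup :=
        PySem.Dict.nodup_keys_insert _ _ _ hnd
      -- need as a Nat cast
      have hneed : PySem.Int.bxor ((1 : Int) <<< m - 1) ((sn : Nat) : Int)
          = (((2 ^ m - 1) ^^^ sn : Nat) : Int) := by
        rw [pv_mask_cast, PySem.Int.bxor_natCast]
      set qn := (2 ^ m - 1) ^^^ sn with hqn
      rw [hneed]
      set order' := first.items ++ [(((sn : Nat) : Int), i)] with horder'
      have hpos' : ∀ p ∈ order', 0 ≤ p.2 ∧ p.2 < i + 1 := by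
        intro p hp
        rcases List.mem_append.mp hp with h | h
        · exact ⟨(hpos p h).1, by have := (hpos p h).2; omega⟩
        · simp only [List.mem_singleton] at h
          subst h; exact ⟨hi, by omega⟩
      have hpair' : order'.Pairwise (fun p q => p.2 < q.2) := by
        rw [horder', List.pairwise_append]
        exact ⟨hpair, List.pairwise_singleton _ _,
          fun p hp q hq => by
            simp only [List.mem_singleton] at hq
            subst hq; exact (hpos p hp).2⟩
      -- the new element matches the filter iff qn is a submask of sn
      have hcond : ∀ qn' : Nat,
          (PySem.Int.band ((sn : Nat) : Int) ((qn' : Nat) : Int) == ((qn' : Nat) : Int)) = true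
            ↔ qn' &&& sn = qn' := by
        intro qn'
        rw [PySem.Int.band_natCast]
        constructor
        · intro h
          have := beq_iff_eq.mp h
          exact_mod_cast (Nat.and_comm sn qn' ▸ this)
        · intro h
          apply beq_iff_eq.mpr
          exact_mod_cast (Nat.and_comm qn' sn ▸ congrArg (Nat.cast : Nat → Int) h)
      -- the dict after the submask loop, against the extended items list
      have hinv' : ∀ qn' : Nat, (subLoopA ((sn : Nat) : Int) i d ((sn : Nat) : Int)).get? (↑qn') =
          ((order'.filter (fun p => PySem.Int.band p.1 (↑qn') == ((qn' : Nat) : Int))).map (·.2)).getLast? := by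
        intro qn'
        rw [subLoopA_run, horder', List.filter_append, List.map_append, hinv qn']
        by_cases h : qn' &&& sn = qn'
        · rw [if_pos h]
          simp only [List.filter_cons, List.filter_nil]
          rw [if_pos ((hcond qn').mpr h)]
          simp
        · rw [if_neg h]
          simp only [List.filter_cons, List.filter_nil]
          rw [if_neg (by intro hcontra; exact h ((hcond qn').mp hcontra))]
          simp only [List.map_nil, List.append_nil]
      -- both early-return decisions agree
      rw [hinv' qn]
      simp only [hitems']
      have hbest := bestScan_eq (((qn : Nat) : Int)) order' (fun p hp => (hpos' p hp).1) hpair'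
      rcases hlast : ((order'.filter (fun p => PySem.Int.band p.1 (↑qn) == ((qn : Nat) : Int))).map (·.2)).getLast? with _ | v
      · -- no partner: recurse
        rw [hlast] at hbest
        simp only [Option.getD_none] at hbest
        rw [hbest]
        rw [if_neg (by norm_num), hlast]
        have := ih (i + 1) (first.insert ((sn : Nat) : Int) i) _
          (fun r hr => hlen r (List.mem_cons_of_mem _ hr)) (by omega) hnd'
          (by intro qn'; rw [hinv' qn', hitems']) (by rw [hitems']; exact hpos')
          (by rw [hitems']; exact hpair')
        rw [hkeys', ← hsetadd] at this
        exact this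
      · -- partner v found
        rw [hlast] at hbest
        simp only [Option.getD_some] at hbest
        have hv0 : 0 ≤ v := by
          have hvmem := List.mem_of_getLast? hlast
          rcases List.mem_map.mp hvmem with ⟨p, hp, hp2⟩
          have := (hpos' p (List.mem_of_mem_filter hp)).1
          omega
        rw [hbest, if_pos (by omega), hlast]
        show (true, if v > i then ((i : Int), v) else (v, i)) = pvOptA (some (min v i, max v i))
        rw [pv_pair_minmax]
        rfl

theorem checkA_eq_checkB (a : List (List Int)) (m : Nat) (mid : Int)
    (hlen : ∀ row ∈ a, m ≤ row.length) :
    checkA a m mid = pvOptA (checkB a ((1 : Int) <<< m - 1) m mid) := by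
  unfold checkA checkB
  apply checkLoop_eq m mid a 0 PySem.Dict.empty PySem.Dict.empty hlen
  · omega
  · simp [PySem.Dict.keys_empty]
  · intro qn; rfl
  · intro p hp; exact absurd hp List.not_mem_nil
  · exact List.Pairwise.nil

theorem bsA_eq_bsB_aux (a : List (List Int)) (m : Nat)
    (hlen : ∀ row ∈ a, m ≤ row.length) :
    ∀ (fu : Nat) (left right : Int) (res : Int × Int), (right - left).toNat ≤ fu →
      bsA a m left right res = bsB a ((1 : Int) <<< m - 1) m left right res := by
  intro fu
  induction fu with
  | zero =>
    intro l r res h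
    rw [bsA, bsB]
    have hn : ¬ (r - l > 1) := by omega
    rw [dif_neg hn, dif_neg hn]
  | succ n ih =>
    intro l r res h
    rw [bsA, bsB]
    by_cases hc : r - l > 1
    · rw [dif_pos hc, dif_pos hc]
      have hmid2 : PySem.Int.floordiv (l + r) 2 = PySem.Int.floordiv (r + l) 2 := by
        rw [Int.add_comm]
      have hmid' : l < PySem.Int.floordiv (r + l) 2 ∧ PySem.Int.floordiv (r + l) 2 < r := by
        rw [PySem.Int.floordiv_eq_ediv_of_pos (by norm_num)]
        omega
      simp only [hmid2, checkA_eq_checkB a m _ hlen]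
      rcases hck : checkB a ((1 : Int) <<< m - 1) m (PySem.Int.floordiv (r + l) 2) with _ | p
      · simp only [pvOptA]
        rw [if_neg (by simp)]
        exact ih l _ res (by omega)
      · simp only [pvOptA, if_true]
        exact ih _ r p (by omega)
    · rw [dif_neg hc, dif_neg hc]

-- ===== VERDICT (by name: the statement is the Claim_ definition above) =====
theorem solve_spec : Claim_equal_solve := by
  intro a _ hpre
  unfold Spec_solve solve solve_alt
  by_cases hne : a = []
  · subst hne; rfl
  · have h1 : ((a.length : Int) == 0) = false := by
      simp [List.length_eq_zero_iff, hne]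
    have h2 : a.isEmpty = false := by simp [hne]
    rw [h1, h2]
    simp only [Bool.false_eq_true, if_false]
    rw [bsA_eq_bsB_aux a (a.headD []).length hpre ((10 ^ 9 + 1 - 0 : Int)).toNat 0 (10 ^ 9 + 1) (0, 0) (le_refl _)]
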